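-- pv_equiv track=rewrite | github.com/sbstnppl/rpg | src/services/attribute_calculator.py | get_lifestyle_modifiers
-- ===== SOURCE A (Python) =====
-- ATTRIBUTE_NAMES = [
--     "strength",
--     "dexterity",
--     "constitution",
--     "intelligence",
--     "wisdom",
--     "charisma",
-- ]
--
-- LIFESTYLE_MODIFIERS: dict[str, dict[str, int]] = {
--     "malnourished": {"strength": -1, "constitution": -2},
--     "sedentary": {"strength": -1, "constitution": -1},
--     "well_fed": {"constitution": 1},
--     "pampered": {"strength": -1, "constitution": 0, "charisma": 1},
--     "hardship": {"strength": 1, "constitution": 1, "wisdom": 1},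
--     "secret_training_physical": {"strength": 1, "dexterity": 1},
--     "secret_training_mental": {"intelligence": 1, "wisdom": 1},
--     "natural_leader": {"charisma": 2},
--     "bookworm": {"intelligence": 1, "strength": -1},
--     "street_smart": {"dexterity": 1, "wisdom": 1, "charisma": 1},
--     "sheltered": {"wisdom": -1, "charisma": 1},
--     "privileged_education": {"intelligence": 1, "charisma": 1},
-- }
--
-- def get_lifestyle_modifiers(lifestyles: list[str]) -> dict[str, int]:
--     """Get attribute modifiers based on lifestyle tags.
--
--     Args:
--         lifestyles: List of lifestyle tag names.
--
--     Returns: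
--         Dict of combined attribute modifiers.
--     """
--     combined = {stat: 0 for stat in ATTRIBUTE_NAMES}
--
--     for lifestyle in lifestyles:
--         lifestyle_key = lifestyle.lower().replace(" ", "_").replace("-", "_")
--         if lifestyle_key in LIFESTYLE_MODIFIERS:
--             for stat, mod in LIFESTYLE_MODIFIERS[lifestyle_key].items():
--                 combined[stat] += mod
--
--     return combined
-- ===== SOURCE B (Python) =====
-- # Transposed data structure: a per-attribute table (attribute -> {lifestyle: mod}),
-- # so the result is one sum per attribute over the normalized valid keys.
--
-- ATTRIBUTE_NAMES = [
--     "strength",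
--     "dexterity",
--     "constitution",
--     "intelligence",
--     "wisdom",
--     "charisma",
-- ]
--
-- VALID_KEYS = [
--     "malnourished", "sedentary", "well_fed", "pampered", "hardship",
--     "secret_training_physical", "secret_training_mental", "natural_leader",
--     "bookworm", "street_smart", "sheltered", "privileged_education",
-- ]
--
-- MODIFIERS_BY_STAT: dict[str, dict[str, int]] = {
--     "strength": {"malnourished": -1, "sedentary": -1, "pampered": -1,
--                  "hardship": 1, "secret_training_physical": 1, "bookworm": -1},
--     "dexterity": {"secret_training_physical": 1, "street_smart": 1},
--     "constitution": {"malnourished": -2, "sedentary": -1, "well_fed": 1,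
--                      "pampered": 0, "hardship": 1},
--     "intelligence": {"secret_training_mental": 1, "bookworm": 1,
--                      "privileged_education": 1},
--     "wisdom": {"hardship": 1, "secret_training_mental": 1, "street_smart": 1,
--                "sheltered": -1},
--     "charisma": {"pampered": 1, "natural_leader": 2, "street_smart": 1,
--                  "sheltered": 1, "privileged_education": 1},
-- }
--
--
-- def get_lifestyle_modifiers(lifestyles: list[str]) -> dict[str, int]:
--     """Sum attribute modifiers for lifestyle tags, reading a transposed table."""
--     keys = [
--         k
--         for k in (l.lower().replace(" ", "_").replace("-", "_") for l in lifestyles)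
--         if k in VALID_KEYS
--     ]
--     return {
--         stat: sum(table.get(k, 0) for k in keys)
--         for stat, table in MODIFIERS_BY_STAT.items()
--     }
-- ===== Notes on version B (the rewrite author's own statement) =====
-- stated objective: alternative
-- what changed: B stores the modifier table transposed as a per-attribute dict (attribute -> {lifestyle: mod}) and computes one sum per attribute over the normalized valid keys, instead of mutating a pre-zeroed accumulator dict lifestyle by lifestyle.
import Mathlib
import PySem

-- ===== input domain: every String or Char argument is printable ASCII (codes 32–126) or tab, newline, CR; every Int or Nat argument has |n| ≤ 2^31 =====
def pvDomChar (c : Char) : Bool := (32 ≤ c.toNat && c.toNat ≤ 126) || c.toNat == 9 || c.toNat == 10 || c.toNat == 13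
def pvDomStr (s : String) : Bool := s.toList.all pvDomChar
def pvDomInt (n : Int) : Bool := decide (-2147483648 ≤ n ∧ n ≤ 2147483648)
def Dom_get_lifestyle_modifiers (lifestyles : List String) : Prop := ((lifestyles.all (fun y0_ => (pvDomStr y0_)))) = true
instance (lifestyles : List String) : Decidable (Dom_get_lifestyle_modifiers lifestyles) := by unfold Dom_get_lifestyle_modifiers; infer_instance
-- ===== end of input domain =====

-- B stores the modifier table transposed (attribute -> {lifestyle: mod}) and takes one sum per
-- attribute over the normalized valid keys, instead of mutating a pre-zeroed accumulator per lifestyle.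

-- lifestyle.lower().replace(" ", "_").replace("-", "_")  (shared normalization, identical in A and B)
def pvNormKey (lifestyle : String) : String :=
  PySem.Str.replace (PySem.Str.replace (PySem.Str.lower lifestyle) " " "_") "-" "_"

-- ===== PORT A =====
def ATTRIBUTE_NAMES : List String :=
  ["strength", "dexterity", "constitution", "intelligence", "wisdom", "charisma"]

def LIFESTYLE_MODIFIERS : PySem.Dict String (PySem.Dict String Int) := PySem.Dict.mk
  [ ("malnourished", PySem.Dict.mk [("strength", -1), ("constitution", -2)]),
    ("sedentary", PySem.Dict.mk [("strength", -1), ("constitution", -1)]),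
    ("well_fed", PySem.Dict.mk [("constitution", 1)]),
    ("pampered", PySem.Dict.mk [("strength", -1), ("constitution", 0), ("charisma", 1)]),
    ("hardship", PySem.Dict.mk [("strength", 1), ("constitution", 1), ("wisdom", 1)]),
    ("secret_training_physical", PySem.Dict.mk [("strength", 1), ("dexterity", 1)]),
    ("secret_training_mental", PySem.Dict.mk [("intelligence", 1), ("wisdom", 1)]),
    ("natural_leader", PySem.Dict.mk [("charisma", 2)]),
    ("bookworm", PySem.Dict.mk [("intelligence", 1), ("strength", -1)]),
    ("street_smart", PySem.Dict.mk [("dexterity", 1), ("wisdom", 1), ("charisma", 1)]),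
    ("sheltered", PySem.Dict.mk [("wisdom", -1), ("charisma", 1)]),
    ("privileged_education", PySem.Dict.mk [("intelligence", 1), ("charisma", 1)]) ]

-- one iteration of A's outer loop; combined[stat] += mod is Dict.modify (every stat of the table
-- is already a key of combined, so no KeyError occurs and the default 0 is never used)
def pvStepA (combined : PySem.Dict String Int) (lifestyle : String) : PySem.Dict String Int :=
  let lifestyle_key := pvNormKey lifestyle
  match LIFESTYLE_MODIFIERS.get? lifestyle_key with
  | some mods => mods.items.foldl (fun d p => d.modify p.1 0 (fun v => v + p.2)) combined
  | none => combined

def get_lifestyle_modifiers (lifestyles : List String) : List (String × Int) :=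
  let combined := ATTRIBUTE_NAMES.foldl (fun d stat => d.insert stat 0) PySem.Dict.empty
  (lifestyles.foldl pvStepA combined).items

-- ===== PORT B =====
def VALID_KEYS : List String :=
  ["malnourished", "sedentary", "well_fed", "pampered", "hardship",
   "secret_training_physical", "secret_training_mental", "natural_leader",
   "bookworm", "street_smart", "sheltered", "privileged_education"]

def pvTblS : PySem.Dict String Int := PySem.Dict.mk
  [("malnourished", -1), ("sedentary", -1), ("pampered", -1),
   ("hardship", 1), ("secret_training_physical", 1), ("bookworm", -1)]
def pvTblD : PySem.Dict String Int := PySem.Dict.mk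
  [("secret_training_physical", 1), ("street_smart", 1)]
def pvTblC : PySem.Dict String Int := PySem.Dict.mk
  [("malnourished", -2), ("sedentary", -1), ("well_fed", 1), ("pampered", 0), ("hardship", 1)]
def pvTblI : PySem.Dict String Int := PySem.Dict.mk
  [("secret_training_mental", 1), ("bookworm", 1), ("privileged_education", 1)]
def pvTblW : PySem.Dict String Int := PySem.Dict.mk
  [("hardship", 1), ("secret_training_mental", 1), ("street_smart", 1), ("sheltered", -1)]
def pvTblH : PySem.Dict String Int := PySem.Dict.mk
  [("pampered", 1), ("natural_leader", 2), ("street_smart", 1),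
   ("sheltered", 1), ("privileged_education", 1)]

def MODIFIERS_BY_STAT : PySem.Dict String (PySem.Dict String Int) := PySem.Dict.mk
  [("strength", pvTblS), ("dexterity", pvTblD), ("constitution", pvTblC),
   ("intelligence", pvTblI), ("wisdom", pvTblW), ("charisma", pvTblH)]

def get_lifestyle_modifiers_alt (lifestyles : List String) : List (String × Int) :=
  let keys := (lifestyles.map pvNormKey).filter (fun k => VALID_KEYS.contains k)
  MODIFIERS_BY_STAT.items.map (fun p => (p.1, (keys.map (fun k => p.2.getD k 0)).sum))

-- ===== PRECONDITION & SPEC =====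
def Spec_get_lifestyle_modifiers (lifestyles : List String) (out : List (String × Int)) : Prop := out = get_lifestyle_modifiers_alt lifestyles
instance (lifestyles : List String) (out : List (String × Int)) : Decidable (Spec_get_lifestyle_modifiers lifestyles out) := by unfold Spec_get_lifestyle_modifiers; infer_instance

-- ===== CLAIM =====
def Claim_equal_get_lifestyle_modifiers : Prop := ∀ (lifestyles : List String), Dom_get_lifestyle_modifiers lifestyles → Spec_get_lifestyle_modifiers lifestyles (get_lifestyle_modifiers lifestyles)

-- ===== LEMMAS AND PROOFS =====

-- per-attribute sum contributed by B's filtered, normalized keys, for one transposed table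
def pvSum (ls : List String) (tbl : PySem.Dict String Int) : Int :=
  (((ls.map pvNormKey).filter (fun k => VALID_KEYS.contains k)).map (fun k => tbl.getD k 0)).sum

theorem pvSum_cons (l : String) (rest : List String) (tbl : PySem.Dict String Int) :
    pvSum (l :: rest) tbl =
      (if VALID_KEYS.contains (pvNormKey l) then tbl.getD (pvNormKey l) 0 else 0) + pvSum rest tbl := by
  simp only [pvSum, List.map_cons, List.filter_cons]
  split_ifs with h <;> simp

-- loop invariant: running A's loop on an accumulator holding the six attributes (in order)
-- adds B's per-attribute sums to the stored values
theorem pvLoopA (ls : List String) (a b c i w h : Int) :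
    (ls.foldl pvStepA (PySem.Dict.mk
      [("strength", a), ("dexterity", b), ("constitution", c),
       ("intelligence", i), ("wisdom", w), ("charisma", h)])).items =
    [("strength", a + pvSum ls pvTblS), ("dexterity", b + pvSum ls pvTblD),
     ("constitution", c + pvSum ls pvTblC), ("intelligence", i + pvSum ls pvTblI),
     ("wisdom", w + pvSum ls pvTblW), ("charisma", h + pvSum ls pvTblH)] := by
  induction ls generalizing a b c i w h with
  | nil => simp [pvSum]
  | cons l rest ih =>
    simp only [List.foldl_cons, pvSum_cons]
    by_cases h1 : pvNormKey l = "malnourished"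
    · simp only [pvTblS, pvTblD, pvTblC, pvTblI, pvTblW, pvTblH] at ih ⊢
      simp [pvStepA, h1, LIFESTYLE_MODIFIERS, PySem.Dict.get?, PySem.Dict.modify,
            PySem.Dict.insert, PySem.Dict.getD, VALID_KEYS]
      rw [ih]
      simp
      omega
    by_cases h2 : pvNormKey l = "sedentary"
    · simp only [pvTblS, pvTblD, pvTblC, pvTblI, pvTblW, pvTblH] at ih ⊢
      simp [pvStepA, h2, LIFESTYLE_MODIFIERS, PySem.Dict.get?, PySem.Dict.modify,
            PySem.Dict.insert, PySem.Dict.getD, VALID_KEYS]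
      rw [ih]
      simp
      omega
    by_cases h3 : pvNormKey l = "well_fed"
    · simp only [pvTblS, pvTblD, pvTblC, pvTblI, pvTblW, pvTblH] at ih ⊢
      simp [pvStepA, h3, LIFESTYLE_MODIFIERS, PySem.Dict.get?, PySem.Dict.modify,
            PySem.Dict.insert, PySem.Dict.getD, VALID_KEYS]
      rw [ih]
      simp
      omega
    by_cases h4 : pvNormKey l = "pampered"
    · simp only [pvTblS, pvTblD, pvTblC, pvTblI, pvTblW, pvTblH] at ih ⊢
      simp [pvStepA, h4, LIFESTYLE_MODIFIERS, PySem.Dict.get?, PySem.Dict.modify,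
            PySem.Dict.insert, PySem.Dict.getD, VALID_KEYS]
      rw [ih]
      simp
      omega
    by_cases h5 : pvNormKey l = "hardship"
    · simp only [pvTblS, pvTblD, pvTblC, pvTblI, pvTblW, pvTblH] at ih ⊢
      simp [pvStepA, h5, LIFESTYLE_MODIFIERS, PySem.Dict.get?, PySem.Dict.modify,
            PySem.Dict.insert, PySem.Dict.getD, VALID_KEYS]
      rw [ih]
      simp
      omega
    by_cases h6 : pvNormKey l = "secret_training_physical"
    · simp only [pvTblS, pvTblD, pvTblC, pvTblI, pvTblW, pvTblH] at ih ⊢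
      simp [pvStepA, h6, LIFESTYLE_MODIFIERS, PySem.Dict.get?, PySem.Dict.modify,
            PySem.Dict.insert, PySem.Dict.getD, VALID_KEYS]
      rw [ih]
      simp
      omega
    by_cases h7 : pvNormKey l = "secret_training_mental"
    · simp only [pvTblS, pvTblD, pvTblC, pvTblI, pvTblW, pvTblH] at ih ⊢
      simp [pvStepA, h7, LIFESTYLE_MODIFIERS, PySem.Dict.get?, PySem.Dict.modify,
            PySem.Dict.insert, PySem.Dict.getD, VALID_KEYS]
      rw [ih]
      simp
      omega
    by_cases h8 : pvNormKey l = "natural_leader"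
    · simp only [pvTblS, pvTblD, pvTblC, pvTblI, pvTblW, pvTblH] at ih ⊢
      simp [pvStepA, h8, LIFESTYLE_MODIFIERS, PySem.Dict.get?, PySem.Dict.modify,
            PySem.Dict.insert, PySem.Dict.getD, VALID_KEYS]
      rw [ih]
      simp
      omega
    by_cases h9 : pvNormKey l = "bookworm"
    · simp only [pvTblS, pvTblD, pvTblC, pvTblI, pvTblW, pvTblH] at ih ⊢
      simp [pvStepA, h9, LIFESTYLE_MODIFIERS, PySem.Dict.get?, PySem.Dict.modify,
            PySem.Dict.insert, PySem.Dict.getD, VALID_KEYS]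
      rw [ih]
      simp
      omega
    by_cases h10 : pvNormKey l = "street_smart"
    · simp only [pvTblS, pvTblD, pvTblC, pvTblI, pvTblW, pvTblH] at ih ⊢
      simp [pvStepA, h10, LIFESTYLE_MODIFIERS, PySem.Dict.get?, PySem.Dict.modify,
            PySem.Dict.insert, PySem.Dict.getD, VALID_KEYS]
      rw [ih]
      simp
      omega
    by_cases h11 : pvNormKey l = "sheltered"
    · simp only [pvTblS, pvTblD, pvTblC, pvTblI, pvTblW, pvTblH] at ih ⊢
      simp [pvStepA, h11, LIFESTYLE_MODIFIERS, PySem.Dict.get?, PySem.Dict.modify,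
            PySem.Dict.insert, PySem.Dict.getD, VALID_KEYS]
      rw [ih]
      simp
      omega
    by_cases h12 : pvNormKey l = "privileged_education"
    · simp only [pvTblS, pvTblD, pvTblC, pvTblI, pvTblW, pvTblH] at ih ⊢
      simp [pvStepA, h12, LIFESTYLE_MODIFIERS, PySem.Dict.get?, PySem.Dict.modify,
            PySem.Dict.insert, PySem.Dict.getD, VALID_KEYS]
      rw [ih]
      simp
      omega
    simp only [pvStepA]
    simp [LIFESTYLE_MODIFIERS, PySem.Dict.get?, VALID_KEYS,
          h1, h2, h3, h4, h5, h6, h7, h8, h9, h10, h11, h12,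
          Ne.symm h1, Ne.symm h2, Ne.symm h3, Ne.symm h4, Ne.symm h5, Ne.symm h6, Ne.symm h7, Ne.symm h8, Ne.symm h9, Ne.symm h10, Ne.symm h11, Ne.symm h12]
    rw [ih]

-- ===== VERDICT =====
theorem get_lifestyle_modifiers_spec : Claim_equal_get_lifestyle_modifiers := by
  intro ls _
  show _ = _
  simp only [get_lifestyle_modifiers, get_lifestyle_modifiers_alt]
  show (List.foldl pvStepA (PySem.Dict.mk
      [("strength", 0), ("dexterity", 0), ("constitution", 0),
       ("intelligence", 0), ("wisdom", 0), ("charisma", 0)]) ls).items = _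
  rw [pvLoopA ls 0 0 0 0 0 0]
  simp only [zero_add]
  rfl
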